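-- pv_equiv track=rewrite | github.com/pizzimenti/whisper-dictate | kglobal_hotkey.py | _expand_modifier_masks
-- ===== SOURCE A (Python) =====
-- def _expand_modifier_masks(required_mask: int, ignored_mask: int) -> list[int]:
--     """Return the exact modifier masks KWin should treat as equivalent."""
--
--     masks = [required_mask]
--     bit = 1
--     remaining = ignored_mask
--     while remaining:
--         if remaining & bit:
--             masks.extend(existing | bit for existing in list(masks))
--             remaining &= ~bit
--         bit <<= 1
--     return sorted(set(masks))
-- ===== SOURCE B (Python) =====
-- def _expand_modifier_masks(required_mask: int, ignored_mask: int) -> list[int]: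
--     """Return the exact modifier masks KWin should treat as equivalent."""
--
--     # Precompute the set bit values of ignored_mask, then enumerate all
--     # 2**k subsets directly by counting.
--     bits = []
--     place = 1
--     x = ignored_mask
--     while x:
--         if x % 2:
--             bits.append(place)
--         x //= 2
--         place *= 2
--     vals = []
--     for m in range(1 << len(bits)):
--         v = required_mask
--         mm = m
--         for b in bits:
--             if mm % 2:
--                 v |= b
--             mm //= 2
--         vals.append(v)
--     return sorted(set(vals))
-- ===== Notes on version B (the rewrite author's own statement) =====
-- stated objective: alternative
-- what changed: A grows the mask list incrementally inside a bit-sweeping while-loop (doubling the list each time it meets a set bit and clearing that bit from the remainder); B first extracts the table of set-bit values of ignored_mask and then enumerates all 2^k subsets directly by counting over range(1 << k), ORing the selected bits onto required_mask.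
import Mathlib
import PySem

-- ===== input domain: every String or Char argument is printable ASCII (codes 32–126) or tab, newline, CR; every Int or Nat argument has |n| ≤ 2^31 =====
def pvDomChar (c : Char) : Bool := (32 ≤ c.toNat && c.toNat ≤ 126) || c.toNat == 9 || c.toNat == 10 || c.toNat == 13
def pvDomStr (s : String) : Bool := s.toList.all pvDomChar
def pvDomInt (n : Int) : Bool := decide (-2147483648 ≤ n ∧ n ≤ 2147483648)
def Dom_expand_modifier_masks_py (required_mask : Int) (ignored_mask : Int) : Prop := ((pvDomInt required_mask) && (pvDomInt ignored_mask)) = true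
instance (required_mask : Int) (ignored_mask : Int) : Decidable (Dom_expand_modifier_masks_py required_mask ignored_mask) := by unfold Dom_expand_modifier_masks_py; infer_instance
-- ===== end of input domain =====

-- B replaces A's incremental list-doubling sweep with a precomputed table of ignored_mask's
-- set-bit values followed by a direct enumeration of all 2^k bit subsets by counting (objective: alternative).

-- ===== PORT A =====
-- A's 'while remaining: …', step for step, on Int via the PySem bit primitives.  The fuel
-- argument only makes the loop total: within Dom (|ignored_mask| ≤ 2^31) and Pre_
-- (0 ≤ ignored_mask) the body runs at most 32 times, so fuel 64 is never exhausted.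
def pvLoopA : Nat → List Int → Int → Int → List Int
  | 0, masks, _, _ => masks
  | f+1, masks, bit, remaining =>
    if remaining = 0 then masks
    else if PySem.Int.band remaining bit ≠ 0 then
      pvLoopA f (masks ++ masks.map (fun existing => PySem.Int.bor existing bit)) (bit <<< (1:Nat))
        (PySem.Int.band remaining (Int.not bit))
    else pvLoopA f masks (bit <<< (1:Nat)) remaining

def expand_modifier_masks_py (required_mask : Int) (ignored_mask : Int) : List Int :=
  PySem.List.sorted (PySem.Set.ofList (pvLoopA 64 [required_mask] 1 ignored_mask)) (fun x => x) false

-- ===== PORT B =====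
-- B's 'while x: if x % 2: bits.append(place); x //= 2; place *= 2'; fuel 64 again only for
-- totality (within Dom ∩ Pre_ at most 32 halvings reach 0).
def pvBitsB : Nat → Int → Int → List Int
  | 0, _, _ => []
  | f+1, x, place =>
    if x = 0 then []
    else if PySem.Int.mod x 2 = 1 then place :: pvBitsB f (PySem.Int.floordiv x 2) (place * 2)
    else pvBitsB f (PySem.Int.floordiv x 2) (place * 2)

-- B's inner 'for b in bits: if mm % 2: v |= b; mm //= 2'
def pvInner (v : Int) (bits : List Int) (mm : Int) : Int :=
  match bits with
  | [] => v
  | b :: bs => pvInner (if PySem.Int.mod mm 2 = 1 then PySem.Int.bor v b else v) bs (PySem.Int.floordiv mm 2)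

def expand_modifier_masks_py_alt (required_mask : Int) (ignored_mask : Int) : List Int :=
  let bits := pvBitsB 64 ignored_mask 1
  PySem.List.sorted
    (PySem.Set.ofList ((PySem.List.pyRange 0 (1 <<< bits.length) 1).map (fun m => pvInner required_mask bits m)))
    (fun x => x) false

-- ===== PRECONDITION & SPEC =====
-- Pre_ excludes only negative ignored_mask, on which A's while-loop never terminates
-- (a negative int has infinitely many set high bits, so 'remaining' never becomes 0).
def Pre_expand_modifier_masks_py (required_mask : Int) (ignored_mask : Int) : Prop := 0 ≤ ignored_mask
instance (required_mask : Int) (ignored_mask : Int) : Decidable (Pre_expand_modifier_masks_py required_mask ignored_mask) := by unfold Pre_expand_modifier_masks_py; infer_instance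
def pvWitness_expand_modifier_masks_py : Int × Int := (3, 5)

def Spec_expand_modifier_masks_py (required_mask : Int) (ignored_mask : Int) (out : List Int) : Prop := out = expand_modifier_masks_py_alt required_mask ignored_mask
instance (required_mask : Int) (ignored_mask : Int) (out : List Int) : Decidable (Spec_expand_modifier_masks_py required_mask ignored_mask out) := by unfold Spec_expand_modifier_masks_py; infer_instance

-- ===== CLAIM (what is proved, stated in full; the proofs are below) =====
def Claim_equal_expand_modifier_masks_py : Prop := ∀ (required_mask : Int) (ignored_mask : Int), Dom_expand_modifier_masks_py required_mask ignored_mask → Pre_expand_modifier_masks_py required_mask ignored_mask → Spec_expand_modifier_masks_py required_mask ignored_mask (expand_modifier_masks_py required_mask ignored_mask)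

-- ===== LEMMAS AND PROOFS =====

-- the doubling step A applies for each set bit of 'remaining'
def pvStep (ms : List Int) (b : Int) : List Int := ms ++ ms.map (fun e => PySem.Int.bor e b)

-- r & ~b clears b's bits from a nonnegative r
theorem pv_band_not (r b : Nat) :
    PySem.Int.band (r : Int) (Int.not (b : Int)) = ((r - (r &&& b) : Nat) : Int) := by
  simp [PySem.Int.band, Int.not]

-- (2^k * q) & 2^k reads bit k, which is the parity of q
theorem pv_and_pow (k q : Nat) : (2 ^ k * q) &&& 2 ^ k = (if q % 2 = 1 then 2 ^ k else 0) := by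
  rw [Nat.and_two_pow, Nat.testBit_eq_decide_div_mod_eq,
    Nat.mul_div_cancel_left _ (Nat.two_pow_pos k)]
  by_cases h : q % 2 = 1 <;> simp [h]

theorem pv_cast_mod (m : Nat) : PySem.Int.mod (m : Int) 2 = ((m % 2 : Nat) : Int) := by
  exact_mod_cast PySem.Int.mod_natCast m 2

theorem pv_cast_div (m : Nat) : PySem.Int.floordiv (m : Int) 2 = ((m / 2 : Nat) : Int) := by
  exact_mod_cast PySem.Int.floordiv_natCast m 2

-- A's sweep starting at bit = 2^k over remaining = 2^k * q is the doubling fold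
-- over the bit table B computes (same fuel on both sides)
theorem pv_loopA_eq_fold (f : Nat) : ∀ (k q : Nat) (masks : List Int), q < 2 ^ f →
    pvLoopA f masks ((2 ^ k : Nat) : Int) ((2 ^ k * q : Nat) : Int) =
      List.foldl pvStep masks (pvBitsB f ((q : Nat) : Int) ((2 ^ k : Nat) : Int)) := by
  induction f with
  | zero =>
    intro k q masks hq
    have : q = 0 := by omega
    subst this
    simp [pvLoopA, pvBitsB]
  | succ f ih =>
    intro k q masks hq
    by_cases hq0 : q = 0
    · subst hq0; simp [pvLoopA, pvBitsB]
    · have hpow : (0:Nat) < 2 ^ k := Nat.two_pow_pos k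
      have hq0' : ((q : Nat) : Int) ≠ 0 := by exact_mod_cast hq0
      have hband : PySem.Int.band ((2 ^ k * q : Nat) : Int) ((2 ^ k : Nat) : Int)
          = ((if q % 2 = 1 then 2 ^ k else 0 : Nat) : Int) := by
        rw [PySem.Int.band_natCast, pv_and_pow]
      have hshift : ((2 ^ k : Nat) : Int) <<< (1:Nat) = ((2 ^ (k+1) : Nat) : Int) := by
        rw [Int.shiftLeft_eq]; push_cast [pow_succ]; ring
      have hcast2 : ((2 ^ k : Nat) : Int) * 2 = ((2 ^ (k+1) : Nat) : Int) := by
        push_cast [pow_succ]; ring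
      have hrem0 : ((2 ^ k * q : Nat) : Int) ≠ 0 := by
        simp only [ne_eq, Nat.cast_eq_zero]; positivity
      by_cases hodd : q % 2 = 1
      · have hcond : PySem.Int.band ((2 ^ k * q : Nat) : Int) ((2 ^ k : Nat) : Int) ≠ 0 := by
          rw [hband, hodd]; simp only [if_pos]
          exact Int.natCast_ne_zero.mpr (by omega)
        have hupd : PySem.Int.band ((2 ^ k * q : Nat) : Int) (Int.not ((2 ^ k : Nat) : Int))
            = ((2 ^ (k+1) * (q / 2) : Nat) : Int) := by
          rw [pv_band_not, pv_and_pow]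
          congr 1
          simp only [hodd, if_pos]
          have h2 : q = 2 * (q/2) + 1 := by omega
          calc 2 ^ k * q - 2 ^ k = 2 ^ k * (2 * (q/2) + 1) - 2^k := by rw [← h2]
            _ = 2 ^ (k+1) * (q/2) := by ring_nf; omega
        have hbits : pvBitsB (f+1) ((q : Nat) : Int) ((2 ^ k : Nat) : Int)
            = ((2 ^ k : Nat) : Int) :: pvBitsB f ((q / 2 : Nat) : Int) ((2 ^ (k+1) : Nat) : Int) := by
          rw [pvBitsB, if_neg hq0', pv_cast_mod, pv_cast_div, hcast2]
          simp [hodd]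
        rw [pvLoopA, if_neg hrem0, if_pos hcond, hshift, hupd, hbits, List.foldl_cons]
        have := ih (k+1) (q/2) (pvStep masks ((2 ^ k : Nat) : Int)) (by omega)
        simp only [pvStep] at this
        exact this
      · have hcond : ¬ (PySem.Int.band ((2 ^ k * q : Nat) : Int) ((2 ^ k : Nat) : Int) ≠ 0) := by
          rw [hband]
          have : q % 2 = 0 := by omega
          simp [this]
        have hbits : pvBitsB (f+1) ((q : Nat) : Int) ((2 ^ k : Nat) : Int)
            = pvBitsB f ((q / 2 : Nat) : Int) ((2 ^ (k+1) : Nat) : Int) := by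
          rw [pvBitsB, if_neg hq0', pv_cast_mod, pv_cast_div, hcast2]
          have : q % 2 = 0 := by omega
          simp [this]
        have hrw : (2 ^ k * q : Nat) = (2 ^ (k+1) * (q / 2) : Nat) := by
          have h2 : q = 2 * (q/2) := by omega
          calc 2 ^ k * q = 2 ^ k * (2 * (q/2)) := by rw [← h2]
            _ = 2 ^ (k+1) * (q/2) := by ring
        rw [pvLoopA, if_neg hrem0, if_neg hcond, hshift, hbits, hrw]
        exact ih (k+1) (q/2) masks (by omega)

-- B's inner loop only reads the low bits: an appended table entry is invisible below 2^|bits|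
theorem pv_inner_low (bits : List Int) : ∀ (b r : Int) (m : Nat), m < 2 ^ bits.length →
    pvInner r (bits ++ [b]) (m : Int) = pvInner r bits (m : Int) := by
  induction bits with
  | nil =>
    intro b r m hm
    have hm0 : m = 0 := by simp at hm; omega
    subst hm0
    simp [pvInner]
  | cons c cs ih =>
    intro b r m hm
    simp only [List.cons_append, pvInner, pv_cast_mod, pv_cast_div]
    exact ih b _ (m / 2) (by
      have : 2 ^ (c :: cs).length = 2 * 2 ^ cs.length := by simp [List.length_cons, pow_succ]; ring
      omega)

-- the high half of the count selects the appended entry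
theorem pv_inner_high (bits : List Int) : ∀ (b r : Int) (m : Nat), m < 2 ^ bits.length →
    pvInner r (bits ++ [b]) ((2 ^ bits.length + m : Nat) : Int) =
      PySem.Int.bor (pvInner r bits (m : Int)) b := by
  induction bits with
  | nil =>
    intro b r m hm
    have hm0 : m = 0 := by simp at hm; omega
    subst hm0
    simp [pvInner]
  | cons c cs ih =>
    intro b r m hm
    have hlen : 2 ^ (c :: cs).length = 2 * 2 ^ cs.length := by simp [List.length_cons, pow_succ]; ring
    simp only [List.cons_append, pvInner, pv_cast_mod, pv_cast_div]
    have h1 : (2 ^ (c :: cs).length + m) % 2 = m % 2 := by omega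
    have h2 : (2 ^ (c :: cs).length + m) / 2 = 2 ^ cs.length + m / 2 := by omega
    rw [h1, h2]
    exact ih b _ (m / 2) (by omega)

-- the doubling fold enumerates exactly B's counter order
theorem pv_fold_eq_enum (bits : List Int) (r : Int) :
    List.foldl pvStep [r] bits =
      (List.range (2 ^ bits.length)).map (fun (m : Nat) => pvInner r bits (m : Int)) := by
  induction bits using List.reverseRecOn with
  | nil => simp [pvInner]
  | append_singleton bs b ih =>
    have hlen : 2 ^ (bs ++ [b]).length = 2 ^ bs.length + 2 ^ bs.length := by
      simp [List.length_append, pow_succ]; ring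
    rw [List.foldl_append]
    simp only [List.foldl_cons, List.foldl_nil, ih, hlen, List.range_add]
    rw [pvStep, List.map_append, List.map_map, List.map_map]
    congr 1
    · exact List.map_congr_left (fun m hm => (pv_inner_low bs b r m (List.mem_range.mp hm)).symm)
    · exact List.map_congr_left (fun m hm => by
        have := pv_inner_high bs b r m (List.mem_range.mp hm)
        simp only [Function.comp_apply]
        push_cast at this ⊢
        exact this.symm)

-- ===== VERDICT (by name: the statement is the Claim_ definition above) =====
theorem expand_modifier_masks_py_spec : Claim_equal_expand_modifier_masks_py := by
  intro r i hdom hpre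
  have hq : ((i.toNat : Nat) : Int) = i := Int.toNat_of_nonneg hpre
  have hqlt : i.toNat < 2 ^ 64 := by
    unfold Dom_expand_modifier_masks_py at hdom
    simp [pvDomInt] at hdom
    omega
  have h1 : pvLoopA 64 [r] 1 i = List.foldl pvStep [r] (pvBitsB 64 i 1) := by
    have := pv_loopA_eq_fold 64 0 i.toNat [r] hqlt
    simpa [hq] using this
  have h3 : PySem.List.pyRange 0 (((1 <<< (pvBitsB 64 i 1).length : Nat) : Int)) 1
      = (List.range (2 ^ (pvBitsB 64 i 1).length)).map (fun (k : Nat) => (k : Int)) := by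
    rw [PySem.List.pyRange_one]
    have htn : ((2:Int) ^ (pvBitsB 64 i 1).length).toNat = 2 ^ (pvBitsB 64 i 1).length := by
      have hc : ((2:Int) ^ (pvBitsB 64 i 1).length) = ((2 ^ (pvBitsB 64 i 1).length : Nat) : Int) := by
        push_cast; ring
      rw [hc, Int.toNat_natCast]
    simp [Nat.shiftLeft_eq, htn]
  unfold Spec_expand_modifier_masks_py expand_modifier_masks_py expand_modifier_masks_py_alt
  simp only [h1, pv_fold_eq_enum, h3, List.map_map]
  rfl
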